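-- pv_equiv track=rewrite | github.com/AcademySoftwareFoundation/OpenImageIO | src/imiv/tools/imiv_ocio_live_update_regression.py | _pick_preferred_target_view
-- ===== SOURCE A (Python) =====
-- def _pick_preferred_target_view(values: list[str], current: str) -> str:
--     ranked: list[str] = []
--     for value in values:
--         if value == current:
--             continue
--         lowered = value.lower()
--         penalty = 0
--         if "raw" in lowered:
--             penalty += 100
--         if "video" in lowered:
--             penalty += 40
--         ranked.append((penalty, value))
--     if not ranked:
--         return ""
--     ranked.sort(key=lambda item: (item[0], item[1]))
--     return ranked[0][1]
-- ===== SOURCE B (Python) =====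
-- def _penalty(value: str) -> int:
--     lowered = value.lower()
--     return 100 * ("raw" in lowered) + 40 * ("video" in lowered)
--
--
-- def _pick_preferred_target_view(values: list[str], current: str) -> str:
--     best = min(
--         ((_penalty(v), v) for v in values if v != current),
--         default=None,
--     )
--     return "" if best is None else best[1]
-- ===== Notes on version B (the rewrite author's own statement) =====
-- stated objective: simpler
-- what changed: Replaces the build-list-then-stable-sort-then-take-first pipeline with a single min() pass over a generator of (penalty, value) tuples (default=None for the empty case), choosing the same lex-least tuple without materialising or sorting a list.
import Mathlib
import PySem

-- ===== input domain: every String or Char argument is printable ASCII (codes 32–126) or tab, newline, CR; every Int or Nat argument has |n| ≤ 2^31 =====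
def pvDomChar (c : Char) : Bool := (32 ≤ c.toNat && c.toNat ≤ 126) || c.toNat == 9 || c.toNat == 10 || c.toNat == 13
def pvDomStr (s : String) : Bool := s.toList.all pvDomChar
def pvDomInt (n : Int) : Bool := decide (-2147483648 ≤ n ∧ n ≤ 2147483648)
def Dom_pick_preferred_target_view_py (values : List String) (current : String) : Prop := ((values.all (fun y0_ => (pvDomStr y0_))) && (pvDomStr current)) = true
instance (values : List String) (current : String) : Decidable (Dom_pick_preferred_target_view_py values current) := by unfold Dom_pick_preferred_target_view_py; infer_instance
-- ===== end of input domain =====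

-- B replaces A's build-list / stable-sort / take-first pipeline with one min-scan over
-- (penalty, value) tuples; same value on every input (objective: simpler).

-- ===== PORT A =====
def pick_preferred_target_view_py (values : List String) (current : String) : String :=
  let ranked : List (Int × String) := values.foldl (fun acc value =>
    if value = current then acc
    else
      let lowered := PySem.Str.lower value
      let penalty : Int := 0
      let penalty := if PySem.Str.isIn "raw" lowered then penalty + 100 else penalty
      let penalty := if PySem.Str.isIn "video" lowered then penalty + 40 else penalty
      acc ++ [(penalty, value)]) []
  if ranked = [] then ""
  else
    let ranked := PySem.List.sorted2 ranked Prod.fst Prod.snd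
    match PySem.List.pyGet? ranked 0 with
    | some item => item.2
    | none => ""   -- unreachable: ranked is nonempty here

-- ===== PORT B =====
def pvPenaltyB (value : String) : Int :=
  let lowered := PySem.Str.lower value
  100 * (if PySem.Str.isIn "raw" lowered then (1 : Int) else 0)
    + 40 * (if PySem.Str.isIn "video" lowered then (1 : Int) else 0)

def pick_preferred_target_view_py_alt (values : List String) (current : String) : String :=
  match PySem.List.min2?
      ((values.filter (fun v => v ≠ current)).map (fun v => (pvPenaltyB v, v)))
      Prod.fst Prod.snd with
  | some best => best.2
  | none => ""

-- ===== PRECONDITION & SPEC =====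
def Spec_pick_preferred_target_view_py (values : List String) (current : String) (out : String) : Prop := out = pick_preferred_target_view_py_alt values current
instance (values : List String) (current : String) (out : String) : Decidable (Spec_pick_preferred_target_view_py values current out) := by unfold Spec_pick_preferred_target_view_py; infer_instance

-- ===== CLAIM (what is proved, stated in full; the proofs are below) =====
def Claim_equal_pick_preferred_target_view_py : Prop := ∀ (values : List String) (current : String), Dom_pick_preferred_target_view_py values current → Spec_pick_preferred_target_view_py values current (pick_preferred_target_view_py values current)

-- ===== LEMMAS AND PROOFS =====

-- A's sequential penalty updates compute the same number as B's arithmetic form.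
lemma penalty_eq (value : String) :
    (let lowered := PySem.Str.lower value
     let penalty : Int := 0
     let penalty := if PySem.Str.isIn "raw" lowered then penalty + 100 else penalty
     if PySem.Str.isIn "video" lowered then penalty + 40 else penalty) = pvPenaltyB value := by
  simp only [pvPenaltyB]
  split_ifs <;> norm_num

-- A's accumulation loop builds exactly the mapped filter.
lemma ranked_eq (values : List String) (current : String) (acc : List (Int × String)) :
    values.foldl (fun acc value =>
      if value = current then acc
      else
        let lowered := PySem.Str.lower value
        let penalty : Int := 0
        let penalty := if PySem.Str.isIn "raw" lowered then penalty + 100 else penalty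
        let penalty := if PySem.Str.isIn "video" lowered then penalty + 40 else penalty
        acc ++ [(penalty, value)]) acc
    = acc ++ (values.filter (fun v => v ≠ current)).map (fun v => (pvPenaltyB v, v)) := by
  simp only [penalty_eq]
  induction values generalizing acc with
  | nil => simp
  | cons v t ih =>
    simp only [List.foldl_cons, List.filter_cons]
    by_cases h : v = current
    · simp [h, ih]
    · simp [h, ih]

-- head of an insertBy step = one min step, for any strict-order test.
lemma head?_insertBy {α : Type} (lt : α → α → Bool) (x : α) (acc : List α) :
    (PySem.List.insertBy lt x acc).head? =
      (match acc.head? with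
       | none => some x
       | some m => if lt x m then some x else some m) := by
  cases acc with
  | nil => rfl
  | cons y ys =>
    simp only [PySem.List.insertBy, List.head?_cons]
    split_ifs <;> rfl

-- head of the insertion-sort fold = the min fold, for any strict-order test.
lemma head?_foldl_insertBy {α : Type} (lt : α → α → Bool) (xs : List α) (acc : List α) :
    (xs.foldl (fun a x => PySem.List.insertBy lt x a) acc).head? =
      xs.foldl (fun m x =>
        match m with
        | none => some x
        | some m => if lt x m then some x else some m) acc.head? := by
  induction xs generalizing acc with
  | nil => rfl
  | cons x t ih => simp only [List.foldl_cons, ih, head?_insertBy]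

-- the min fold never goes back to none
lemma min2step_isSome {α κ₁ κ₂ : Type} [LT κ₁] [DecidableLT κ₁] [LT κ₂] [DecidableLT κ₂]
    (k1 : α → κ₁) (k2 : α → κ₂) (t : List α) (m : α) :
    (t.foldl (fun acc x =>
        match acc with
        | none => some x
        | some m =>
          if (decide (k1 x < k1 m) || !decide (k1 m < k1 x) && decide (k2 x < k2 m)) = true
          then some x else some m) (some m)).isSome = true := by
  induction t generalizing m with
  | nil => rfl
  | cons y t ih =>
    simp only [List.foldl_cons]
    split_ifs <;> exact ih _

-- head of sorted2 (ascending) = min2?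
lemma head?_sorted2_eq_min2? {α κ₁ κ₂ : Type} [LT κ₁] [DecidableLT κ₁] [LT κ₂] [DecidableLT κ₂]
    (xs : List α) (k1 : α → κ₁) (k2 : α → κ₂) :
    (PySem.List.sorted2 xs k1 k2 false).head? = PySem.List.min2? xs k1 k2 := by
  simp only [PySem.List.sorted2, PySem.List.min2?]
  exact head?_foldl_insertBy _ xs []

-- the whole tail of A (empty test, sort, index 0) equals B's min2? match
lemma pick_core (L : List (Int × String)) :
    (if L = [] then ""
     else
       match PySem.List.pyGet? (PySem.List.sorted2 L Prod.fst Prod.snd) 0 with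
       | some item => item.2
       | none => "")
    = (match PySem.List.min2? L Prod.fst Prod.snd with
       | some best => best.2
       | none => "") := by
  cases L with
  | nil => rfl
  | cons p t =>
    obtain ⟨m, hm⟩ : ∃ m, PySem.List.min2? (p :: t) Prod.fst Prod.snd = some m := by
      have h := min2step_isSome (α := Int × String) Prod.fst Prod.snd t p
      simp only [PySem.List.min2?, List.foldl_cons]
      exact Option.isSome_iff_exists.mp h
    have hhead := head?_sorted2_eq_min2? (p :: t) Prod.fst Prod.snd
    rw [hm] at hhead
    cases hs : PySem.List.sorted2 (p :: t) Prod.fst Prod.snd false with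
    | nil => rw [hs] at hhead; simp at hhead
    | cons q t' =>
      rw [hs] at hhead
      simp only [List.head?_cons, Option.some.injEq] at hhead
      subst hhead
      simp [hm, PySem.List.pyGet?, PySem.List.pyIdx?]

-- ===== VERDICT (by name: the statement is the Claim_ definition above) =====
theorem pick_preferred_target_view_py_spec : Claim_equal_pick_preferred_target_view_py := by
  intro values current _
  unfold Spec_pick_preferred_target_view_py pick_preferred_target_view_py
    pick_preferred_target_view_py_alt
  simp only [ranked_eq, List.nil_append]
  exact pick_core _
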